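-- pv_equiv track=rewrite | github.com/Casta1164622/EstLab02SACM1164622R | EstLab02SACM1164622/assignPlaceValues.py | assignPlaceValues
-- ===== SOURCE A (Python) =====
-- def assignPlaceValues(input):
--     keyList = dict()
--     placeNumber = 0;
--     for i in input:
--         for key in i:
--             if(i.get(key) and key not in keyList):
--                 keyList[key] = placeNumber
--                 placeNumber+=1
--     return keyList
-- ===== SOURCE B (Python) =====
-- def assignPlaceValues(input):
--     # Flatten to the truthy keys; one backward overwrite pass records each key's
--     # first position (no membership tests at all); sorting the keys by that
--     # position and enumerating yields the place values.
--     keys = [k for i in input for k in i if i.get(k)]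
--     first = {}
--     for p in range(len(keys) - 1, -1, -1):
--         first[keys[p]] = p
--     ranked = sorted(first, key=first.get)
--     return {k: n for n, k in enumerate(ranked)}
-- ===== Notes on version B (the rewrite author's own statement) =====
-- stated objective: alternative
-- what changed: Replaces A's forward pass with a global seen-dict and running counter by a position-based pipeline: flatten to the truthy keys, record each key's first position by a backward overwrite pass over the index range (no membership tests), then sort the keys by that position and enumerate.
import Mathlib
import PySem

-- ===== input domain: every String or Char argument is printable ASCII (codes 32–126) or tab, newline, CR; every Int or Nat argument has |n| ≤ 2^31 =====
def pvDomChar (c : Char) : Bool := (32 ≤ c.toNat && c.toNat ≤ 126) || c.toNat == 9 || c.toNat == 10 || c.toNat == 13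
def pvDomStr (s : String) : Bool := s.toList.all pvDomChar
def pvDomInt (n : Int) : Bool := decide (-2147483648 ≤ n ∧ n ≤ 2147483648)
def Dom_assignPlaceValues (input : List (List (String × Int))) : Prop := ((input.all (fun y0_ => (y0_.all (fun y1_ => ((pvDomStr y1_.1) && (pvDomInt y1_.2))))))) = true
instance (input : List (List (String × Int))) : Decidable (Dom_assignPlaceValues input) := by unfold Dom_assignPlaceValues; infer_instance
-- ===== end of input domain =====

-- B flattens to the truthy keys, records each key's first position by a single
-- backward overwrite pass over the index range, then sorts the keys by that
-- position and enumerates, instead of A's forward pass with a seen-dict and a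
-- running counter (objective: alternative; same return value).

-- ===== PORT A =====
def assignPlaceValues (input : List (List (String × Int))) : List (String × Int) :=
  (input.foldl
    (fun (st : PySem.Dict String Int × Int) i =>
      i.foldl
        (fun (st : PySem.Dict String Int × Int) p =>
          if (PySem.Dict.get? (PySem.Dict.mk i) p.1).getD 0 ≠ 0 ∧
             PySem.Dict.contains st.1 p.1 = false
          then (PySem.Dict.insert st.1 p.1 st.2, st.2 + 1)
          else st)
        st)
    (PySem.Dict.mk [], 0)).1.items

-- ===== PORT B =====
def assignPlaceValues_alt (input : List (List (String × Int))) : List (String × Int) :=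
  let keys := input.flatMap (fun i =>
    (i.filter (fun p => (PySem.Dict.get? (PySem.Dict.mk i) p.1).getD 0 != 0)).map Prod.fst)
  let first := (PySem.List.pyRange ((keys.length : Int) - 1) (-1) (-1)).foldl
    (fun (d : PySem.Dict String Int) p =>
      match PySem.List.pyGet? keys p with
      | some k => PySem.Dict.insert d k p
      | none => d)
    (PySem.Dict.mk [])
  let ranked := PySem.List.sorted first.keys (fun k => (PySem.Dict.get? first k).getD 0)
  (PySem.List.enumerate ranked).map (fun q => (q.2, q.1))

-- ===== PRECONDITION & SPEC =====
def Spec_assignPlaceValues (input : List (List (String × Int))) (out : List (String × Int)) : Prop := out = assignPlaceValues_alt input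
instance (input : List (List (String × Int))) (out : List (String × Int)) : Decidable (Spec_assignPlaceValues input out) := by unfold Spec_assignPlaceValues; infer_instance

-- ===== CLAIM (what is proved, stated in full; the proofs are below) =====
def Claim_equal_assignPlaceValues : Prop := ∀ (input : List (List (String × Int))), Dom_assignPlaceValues input → Spec_assignPlaceValues input (assignPlaceValues input)

-- ===== LEMMAS AND PROOFS =====


-- B's enumeration of an order list, as a dict-items list (A's accumulator shape).
def pvEnum (o : List String) : List (String × Int) :=
  (PySem.List.enumerate o).map (fun q => (q.2, q.1))

lemma enumerate_append_singleton (o : List String) (k : String) (s : Int) :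
    PySem.List.enumerate (o ++ [k]) s
      = PySem.List.enumerate o s ++ [(s + o.length, k)] := by
  induction o generalizing s with
  | nil => simp [PySem.List.enumerate]
  | cons a t ih => simp [PySem.List.enumerate, ih]; ring

lemma pvEnum_append (o : List String) (k : String) :
    pvEnum (o ++ [k]) = pvEnum o ++ [(k, (o.length : Int))] := by
  simp [pvEnum, enumerate_append_singleton]

lemma any_beq_eq_decide_mem (o : List String) (k : String) :
    (o.any fun x => x == k) = decide (k ∈ o) := by
  induction o with
  | nil => rfl
  | cons a t ih =>
    rcases eq_or_ne a k with h | h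
    · simp [h]
    · simp [List.any_cons, ih, h, Ne.symm h]

lemma enumerate_any_snd (o : List String) (k : String) (s : Int) :
    (PySem.List.enumerate o s).any (fun q => q.2 == k) = o.any (fun x => x == k) := by
  induction o generalizing s with
  | nil => rfl
  | cons a t ih => simp [PySem.List.enumerate, ih]

lemma contains_pvEnum (o : List String) (k : String) :
    PySem.Dict.contains (PySem.Dict.mk (pvEnum o)) k = decide (k ∈ o) := by
  show (pvEnum o).any (fun p => p.1 == k) = decide (k ∈ o)
  rw [pvEnum, List.any_map]
  show ((PySem.List.enumerate o 0).any fun q => q.2 == k) = decide (k ∈ o)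
  rw [enumerate_any_snd, any_beq_eq_decide_mem]

lemma insert_pvEnum (o : List String) (k : String) (h : k ∉ o) :
    PySem.Dict.insert (PySem.Dict.mk (pvEnum o)) k (o.length : Int)
      = PySem.Dict.mk (pvEnum (o ++ [k])) := by
  rw [PySem.Dict.insert]
  have hc : (PySem.Dict.mk (pvEnum o)).contains k = false := by
    rw [contains_pvEnum]; simpa using h
  rw [hc]
  simp [pvEnum_append]

-- A's inner loop, tracked as an order list instead of (dict, counter).
lemma pv_inner (i ps : List (String × Int)) (o : List String) :
    ps.foldl
      (fun (st : PySem.Dict String Int × Int) p =>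
        if (PySem.Dict.get? (PySem.Dict.mk i) p.1).getD 0 ≠ 0 ∧
           PySem.Dict.contains st.1 p.1 = false
        then (PySem.Dict.insert st.1 p.1 st.2, st.2 + 1)
        else st)
      (PySem.Dict.mk (pvEnum o), (o.length : Int))
    = (PySem.Dict.mk (pvEnum (ps.foldl
        (fun (order : List String) p =>
          if (PySem.Dict.get? (PySem.Dict.mk i) p.1).getD 0 ≠ 0 ∧ p.1 ∉ order
          then order ++ [p.1] else order)
        o)),
       ((ps.foldl
        (fun (order : List String) p =>
          if (PySem.Dict.get? (PySem.Dict.mk i) p.1).getD 0 ≠ 0 ∧ p.1 ∉ order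
          then order ++ [p.1] else order)
        o).length : Int)) := by
  induction ps generalizing o with
  | nil => rfl
  | cons p t ih =>
    simp only [List.foldl_cons]
    by_cases hv : (PySem.Dict.get? (PySem.Dict.mk i) p.1).getD 0 ≠ 0
    · by_cases hm : p.1 ∈ o
      · have hc : PySem.Dict.contains (PySem.Dict.mk (pvEnum o)) p.1 = true := by
          rw [contains_pvEnum]; simpa using hm
        rw [if_neg (fun h => by rw [hc] at h; exact absurd h.2 (by simp)),
            if_neg (fun h => h.2 hm)]
        exact ih o
      · have hc : PySem.Dict.contains (PySem.Dict.mk (pvEnum o)) p.1 = false := by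
          rw [contains_pvEnum]; simpa using hm
        rw [if_pos ⟨hv, hc⟩, if_pos ⟨hv, hm⟩,
            insert_pvEnum o p.1 hm,
            show ((o.length : Int) + 1) = (((o ++ [p.1]).length : Nat) : Int) by
              simp]
        exact ih (o ++ [p.1])
    · rw [if_neg (fun h => hv h.1), if_neg (fun h => hv h.1)]
      exact ih o

-- A's whole loop, tracked as an order list.
lemma pv_outer (input : List (List (String × Int))) (o : List String) :
    input.foldl
      (fun (st : PySem.Dict String Int × Int) i =>
        i.foldl
          (fun (st : PySem.Dict String Int × Int) p =>
            if (PySem.Dict.get? (PySem.Dict.mk i) p.1).getD 0 ≠ 0 ∧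
               PySem.Dict.contains st.1 p.1 = false
            then (PySem.Dict.insert st.1 p.1 st.2, st.2 + 1)
            else st)
          st)
      (PySem.Dict.mk (pvEnum o), (o.length : Int))
    = (PySem.Dict.mk (pvEnum (input.foldl
        (fun (order : List String) i =>
          i.foldl
            (fun (order : List String) p =>
              if (PySem.Dict.get? (PySem.Dict.mk i) p.1).getD 0 ≠ 0 ∧ p.1 ∉ order
              then order ++ [p.1] else order)
            order)
        o)),
       ((input.foldl
        (fun (order : List String) i =>
          i.foldl
            (fun (order : List String) p =>
              if (PySem.Dict.get? (PySem.Dict.mk i) p.1).getD 0 ≠ 0 ∧ p.1 ∉ order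
              then order ++ [p.1] else order)
            order)
        o).length : Int)) := by
  induction input generalizing o with
  | nil => rfl
  | cons i t ih =>
    simp only [List.foldl_cons]
    rw [pv_inner]
    exact ih _

-- the add-if-truthy-and-fresh row fold is an ordered-set union with the row's truthy keys
lemma pv_dedupFold (i ps : List (String × Int)) (o : List String) :
    ps.foldl
      (fun (order : List String) p =>
        if (PySem.Dict.get? (PySem.Dict.mk i) p.1).getD 0 ≠ 0 ∧ p.1 ∉ order
        then order ++ [p.1] else order)
      o
    = List.foldl PySem.Set.add o
        ((ps.filter (fun p => (PySem.Dict.get? (PySem.Dict.mk i) p.1).getD 0 != 0)).map Prod.fst) := by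
  induction ps generalizing o with
  | nil => rfl
  | cons p t ih =>
    by_cases hv : (PySem.Dict.get? (PySem.Dict.mk i) p.1).getD 0 ≠ 0
    · have hb : ((PySem.Dict.get? (PySem.Dict.mk i) p.1).getD 0 != 0) = true := by
        simpa using hv
      by_cases hm : p.1 ∈ o
      · have hadd : PySem.Set.add o p.1 = o := by
          simp [PySem.Set.add, List.contains_eq_mem, hm]
        have hno : ¬((PySem.Dict.get? (PySem.Dict.mk i) p.1).getD 0 ≠ 0 ∧ p.1 ∉ o) :=
          fun h => h.2 hm
        simp only [List.foldl_cons, List.filter_cons, hb, List.map_cons, if_neg hno,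
                   ite_true, hadd]
        exact ih o
      · have hadd : PySem.Set.add o p.1 = o ++ [p.1] := by
          simp [PySem.Set.add, List.contains_eq_mem, hm]
        have hyes : ((PySem.Dict.get? (PySem.Dict.mk i) p.1).getD 0 ≠ 0 ∧ p.1 ∉ o) := ⟨hv, hm⟩
        simp only [List.foldl_cons, List.filter_cons, hb, List.map_cons, if_pos hyes,
                   ite_true, hadd]
        exact ih (o ++ [p.1])
    · have hb : ((PySem.Dict.get? (PySem.Dict.mk i) p.1).getD 0 != 0) = false := by
        simpa using hv
      have hno : ¬((PySem.Dict.get? (PySem.Dict.mk i) p.1).getD 0 ≠ 0 ∧ p.1 ∉ o) :=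
        fun h => hv h.1
      simp only [List.foldl_cons, List.filter_cons, hb, if_neg hno,
                 Bool.false_eq_true, ite_false]
      exact ih o

-- A's order list is the ordered dedup of the flattened truthy keys
lemma pv_order_eq_dedup (input : List (List (String × Int))) :
    input.foldl
      (fun (order : List String) i =>
        i.foldl
          (fun (order : List String) p =>
            if (PySem.Dict.get? (PySem.Dict.mk i) p.1).getD 0 ≠ 0 ∧ p.1 ∉ order
            then order ++ [p.1] else order)
          order)
      []
    = PySem.List.dedup
        (input.flatMap (fun i =>
          (i.filter (fun p => (PySem.Dict.get? (PySem.Dict.mk i) p.1).getD 0 != 0)).map Prod.fst)) := by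
  rw [PySem.List.dedup, PySem.Set.ofList, List.foldl_flatMap]
  have key : ∀ (rows : List (List (String × Int))) (o : List String),
      rows.foldl
        (fun (order : List String) j =>
          j.foldl
            (fun (order : List String) p =>
              if (PySem.Dict.get? (PySem.Dict.mk j) p.1).getD 0 ≠ 0 ∧ p.1 ∉ order
              then order ++ [p.1] else order)
            order)
        o
      = rows.foldl
          (fun acc j => List.foldl PySem.Set.add acc
            ((j.filter (fun p => (PySem.Dict.get? (PySem.Dict.mk j) p.1).getD 0 != 0)).map Prod.fst))
          o := by
    intro rows
    induction rows with
    | nil => intro o; rfl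
    | cons j u ihr =>
      intro o
      simp only [List.foldl_cons]
      rw [pv_dedupFold]
      exact ihr _
  exact key input _

-- ordered-set union against an arbitrary accumulator, factored through the empty one

lemma pv_setU (xs : List String) (acc : List String) :
    List.foldl PySem.Set.add acc xs
      = acc ++ (List.foldl PySem.Set.add [] xs).filter (fun z => !acc.contains z) := by
  induction xs generalizing acc with
  | nil => simp
  | cons x t ih =>
    simp only [List.foldl_cons]
    rw [ih (PySem.Set.add acc x), ih (PySem.Set.add [] x)]
    by_cases hm : x ∈ acc
    · have h1 : PySem.Set.add acc x = acc := by
        simp [PySem.Set.add, List.contains_eq_mem, hm]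
      have h2 : PySem.Set.add ([] : List String) x = [x] := by
        simp [PySem.Set.add]
      rw [h1, h2]
      simp only [List.filter_append]
      congr 1
      have hx : List.filter (fun z => !acc.contains z) [x] = [] := by
        simp [List.contains_eq_mem, hm]
      rw [List.filter_filter, hx, List.nil_append]
      apply List.filter_congr
      intro z _
      by_cases hz : z ∈ acc
      · simp [List.contains_eq_mem, hz]
      · have hzx : z ≠ x := fun h => hz (h ▸ hm)
        simp [List.contains_eq_mem, hz, hzx]
    · have h1 : PySem.Set.add acc x = acc ++ [x] := by
        simp [PySem.Set.add, List.contains_eq_mem, hm]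
      have h2 : PySem.Set.add ([] : List String) x = [x] := by
        simp [PySem.Set.add]
      rw [h1, h2]
      simp only [List.filter_append, List.append_assoc]
      congr 1
      have hx : List.filter (fun z => !acc.contains z) [x] = [x] := by
        simp [List.contains_eq_mem, hm]
      rw [List.filter_filter, hx]
      congr 1
      apply List.filter_congr
      intro z _
      by_cases hzx : z = x
      · simp [hzx, List.contains_eq_mem]
      · simp [List.contains_eq_mem, hzx]

-- first-occurrence dedup, one step at a time
lemma pv_dedup_cons (x : String) (t : List String) :
    PySem.List.dedup (x :: t)
      = x :: (PySem.List.dedup t).filter (fun z => !([x].contains z)) := by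
  rw [show PySem.List.dedup (x :: t) = List.foldl PySem.Set.add [] (x :: t) from rfl]
  simp only [List.foldl_cons]
  rw [show PySem.Set.add ([] : List String) x = [x] from rfl, pv_setU t [x]]
  rfl

-- the backward overwrite pass, modelled as a front-to-back recursion
def pvModel : List String → Int → PySem.Dict String Int
  | [], _ => PySem.Dict.mk []
  | k :: t, s => (pvModel t (s + 1)).insert k s

lemma pvModel_get? (t : List String) (s : Int) (k : String) :
    (pvModel t s).get? k = (PySem.List.index? t k).map (fun i => s + (i : Int)) := by
  induction t generalizing s with
  | nil => rfl
  | cons a t ih =>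
    by_cases h : k = a
    · subst h
      rw [pvModel, PySem.Dict.get?_insert_self, PySem.List.index?_cons_self]
      simp
    · rw [pvModel, PySem.Dict.get?_insert_of_ne _ _ h,
          PySem.List.index?_cons_of_ne _ (Ne.symm h), ih]
      cases PySem.List.index? t k with
      | none => rfl
      | some i => simp; ring

lemma pvModel_mem_keys (t : List String) (s : Int) (k : String) :
    k ∈ (pvModel t s).keys ↔ k ∈ t := by
  induction t generalizing s with
  | nil => simp [pvModel, PySem.Dict.keys]
  | cons a t ih =>
    rw [pvModel, PySem.Dict.mem_keys_insert]
    simp [ih]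

lemma pvModel_nodup (t : List String) (s : Int) :
    (pvModel t s).keys.Nodup := by
  induction t generalizing s with
  | nil => simp [pvModel, PySem.Dict.keys]
  | cons a t ih => exact PySem.Dict.nodup_keys_insert _ _ _ (ih (s + 1))

-- the descending-position fold builds pvModel
lemma pv_foldr_model (keys : List String) :
    ∀ (m s : Nat), s + m = keys.length →
    (PySem.List.pyRange (s : Int) (keys.length : Int) 1).foldr
      (fun p d =>
        match PySem.List.pyGet? keys p with
        | some k => PySem.Dict.insert d k p
        | none => d)
      (PySem.Dict.mk [])
    = pvModel (keys.drop s) (s : Int) := by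
  intro m
  induction m with
  | zero =>
    intro s hs
    rw [PySem.List.pyRange_one_eq_nil (by omega)]
    rw [show s = keys.length from by omega, List.drop_length]
    rfl
  | succ m ih =>
    intro s hs
    have hsl : s < keys.length := by omega
    rw [PySem.List.pyRange_one_cons (by omega)]
    simp only [List.foldr_cons]
    rw [show ((s : Int) + 1) = (((s + 1 : Nat) : Int)) from by push_cast; ring,
        ih (s + 1) (by omega)]
    rw [PySem.List.pyGet?_natCast, List.getElem?_eq_getElem hsl]
    rw [List.drop_eq_getElem_cons hsl, pvModel]
    rw [show ((s : Int) + 1) = (((s + 1 : Nat) : Int)) from by push_cast; ring]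

lemma pv_first_eq_model (keys : List String) :
    (PySem.List.pyRange ((keys.length : Int) - 1) (-1) (-1)).foldl
      (fun (d : PySem.Dict String Int) p =>
        match PySem.List.pyGet? keys p with
        | some k => PySem.Dict.insert d k p
        | none => d)
      (PySem.Dict.mk [])
    = pvModel keys 0 := by
  rw [PySem.List.pyRange_neg_one_eq_reverse]
  rw [show (-1 : Int) + 1 = 0 from by ring,
      show ((keys.length : Int) - 1) + 1 = (keys.length : Int) from by ring]
  rw [List.foldl_reverse]
  have h := pv_foldr_model keys keys.length 0 (by omega)
  simpa using h

-- first-occurrence position (as a Nat)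
def pvPos (t : List String) (a : String) : Nat := (PySem.List.index? t a).getD 0

lemma pvPos_cons_self (x : String) (t : List String) : pvPos (x :: t) x = 0 := by
  rw [pvPos, PySem.List.index?_cons_self]; rfl

lemma pvPos_cons_ne {x a : String} {t : List String} (h : a ≠ x) (hm : a ∈ t) :
    pvPos (x :: t) a = pvPos t a + 1 := by
  obtain ⟨i, hi⟩ := Option.isSome_iff_exists.mp ((PySem.List.index?_isSome_iff t a).mpr hm)
  rw [pvPos, PySem.List.index?_cons_of_ne _ (Ne.symm h), hi, pvPos, hi]
  rfl

-- along the ordered dedup, first-occurrence positions strictly increase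
lemma pv_pairwise (t : List String) :
    (PySem.List.dedup t).Pairwise (fun a b => pvPos t a < pvPos t b) := by
  induction t with
  | nil => simp [PySem.List.dedup, PySem.Set.ofList]
  | cons x t ih =>
    rw [pv_dedup_cons]
    refine List.Pairwise.cons ?_ ?_
    · intro b hb
      have hbx : b ≠ x := by simpa using List.of_mem_filter hb
      have hbt : b ∈ t := (PySem.List.mem_dedup t b).mp (List.mem_of_mem_filter hb)
      rw [pvPos_cons_self, pvPos_cons_ne hbx hbt]
      omega
    · have hsub : ((PySem.List.dedup t).filter (fun z => !([x].contains z))).Pairwise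
          (fun a b => pvPos t a < pvPos t b) :=
        List.Pairwise.sublist List.filter_sublist ih
      refine List.Pairwise.imp_of_mem ?_ hsub
      intro a b ha hb hab
      have hax : a ≠ x := by simpa using List.of_mem_filter ha
      have hbx : b ≠ x := by simpa using List.of_mem_filter hb
      have hat : a ∈ t := (PySem.List.mem_dedup t a).mp (List.mem_of_mem_filter ha)
      have hbt : b ∈ t := (PySem.List.mem_dedup t b).mp (List.mem_of_mem_filter hb)
      rw [pvPos_cons_ne hax hat, pvPos_cons_ne hbx hbt]
      omega

-- sorting the dict's keys by recorded first position restores first-occurrence order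
lemma pv_ranked_eq_dedup (L : List String) :
    PySem.List.sorted (pvModel L 0).keys (fun k => ((pvModel L 0).get? k).getD 0)
      = PySem.List.dedup L := by
  apply PySem.List.sorted_eq_of_perm_of_pairwise_lt
  · exact (List.perm_ext_iff_of_nodup (PySem.List.nodup_dedup L) (pvModel_nodup L 0)).mpr
      (fun a => by rw [PySem.List.mem_dedup, pvModel_mem_keys])
  · refine List.Pairwise.imp_of_mem ?_ (pv_pairwise L)
    intro a b ha hb hab
    have hat : a ∈ L := (PySem.List.mem_dedup L a).mp ha
    have hbt : b ∈ L := (PySem.List.mem_dedup L b).mp hb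
    obtain ⟨i, hi⟩ := Option.isSome_iff_exists.mp ((PySem.List.index?_isSome_iff L a).mpr hat)
    obtain ⟨j, hj⟩ := Option.isSome_iff_exists.mp ((PySem.List.index?_isSome_iff L b).mpr hbt)
    rw [pvModel_get?, pvModel_get?, hi, hj]
    have h1 : pvPos L a = i := by rw [pvPos, hi]; rfl
    have h2 : pvPos L b = j := by rw [pvPos, hj]; rfl
    rw [h1, h2] at hab
    simp
    omega

-- ===== VERDICT (by name: the statement is the Claim_ definition above) =====
theorem assignPlaceValues_spec : Claim_equal_assignPlaceValues := by
  intro input _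
  unfold Spec_assignPlaceValues assignPlaceValues
  have h := pv_outer input []
  have h0 : pvEnum [] = [] := rfl
  simp only [h0, List.length_nil, Nat.cast_zero] at h
  rw [h, pv_order_eq_dedup]
  simp only [assignPlaceValues_alt]
  rw [pv_first_eq_model, pv_ranked_eq_dedup]
  rfl
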